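-- pv_equiv track=rewrite | github.com/ccarrada23/FIDELITONE-Algorithm | fitness.py | check_depth_levels
-- ===== SOURCE A (Python) =====
-- def check_depth_levels(rack_mesh, location):
--
--     rack_to_check = rack_mesh
--     (d, r, c) = location
--     status_list = []
--     sku_at_loc = rack_to_check[d][r][c]
--
--     for depth_idx in range(len(rack_to_check)):
--         if rack_to_check[depth_idx][r][c] == sku_at_loc or rack_to_check[depth_idx][r][c] == 0: #  same sku at a different depth level or no skus at depth levels
--             status_list.append("True") # means true we can continue finding fitness
--         else:
--             status_list.append("False")
--
--     if status_list.count("False") > 0: # even 1 false in status list means there another item at a different depth level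
--         return False # dont try to find fitness
--     else:
--         return True # keep trying to find fitness
-- ===== SOURCE B (Python) =====
-- def check_depth_levels(rack_mesh, location):
--     (d, r, c) = location
--     sku_at_loc = rack_mesh[d][r][c]
--
--     def ok(lo, hi):
--         # divide and conquer over the half-open depth range [lo, hi)
--         if hi - lo == 0:
--             return True
--         if hi - lo == 1:
--             v = rack_mesh[lo][r][c]
--             return v == sku_at_loc or v == 0
--         mid = (lo + hi) // 2
--         return ok(lo, mid) and ok(mid, hi)
--
--     return ok(0, len(rack_mesh))
-- ===== Notes on version B (the rewrite author's own statement) =====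
-- stated objective: alternative
-- what changed: Replaces A's linear accumulate-'True'/'False'-strings-then-count scan with a divide-and-conquer recursion that splits the depth range in half and conjoins the two halves (short-circuiting).
import Mathlib
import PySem

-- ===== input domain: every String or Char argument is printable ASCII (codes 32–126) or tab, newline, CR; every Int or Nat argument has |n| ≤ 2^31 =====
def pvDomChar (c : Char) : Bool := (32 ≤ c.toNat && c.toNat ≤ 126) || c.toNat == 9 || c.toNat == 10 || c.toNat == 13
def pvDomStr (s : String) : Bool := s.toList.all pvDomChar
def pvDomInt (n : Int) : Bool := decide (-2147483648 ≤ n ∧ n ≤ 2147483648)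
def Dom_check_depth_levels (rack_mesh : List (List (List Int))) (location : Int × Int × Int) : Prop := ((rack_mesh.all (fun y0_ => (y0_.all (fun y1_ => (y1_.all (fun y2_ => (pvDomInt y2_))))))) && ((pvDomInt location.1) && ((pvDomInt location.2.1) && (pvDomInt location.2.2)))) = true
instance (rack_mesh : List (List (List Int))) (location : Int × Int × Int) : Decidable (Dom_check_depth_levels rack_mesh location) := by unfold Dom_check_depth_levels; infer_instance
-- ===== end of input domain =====

-- B replaces A's linear flag-list-then-count scan with a divide-and-conquer recursion over
-- the depth index range; objective: alternative (same asymptotic cost, different algorithm).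

-- ===== PORT A =====
def check_depth_levels (rack_mesh : List (List (List Int))) (location : Int × Int × Int) : Bool :=
  let d := location.1
  let r := location.2.1
  let c := location.2.2
  let sku_at_loc : Int :=
    PySem.List.pyGetD (PySem.List.pyGetD (PySem.List.pyGetD rack_mesh d []) r []) c 0
  let status_list : List String :=
    (PySem.List.pyRange 0 rack_mesh.length 1).foldl
      (fun acc depth_idx =>
        let v := PySem.List.pyGetD (PySem.List.pyGetD (PySem.List.pyGetD rack_mesh depth_idx []) r []) c 0
        if v == sku_at_loc || v == 0 then acc ++ ["True"] else acc ++ ["False"]) []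
  if PySem.List.count status_list "False" > 0 then false else true

-- ===== PORT B =====
-- Source B's helper 'ok(lo, hi)': divide and conquer over the half-open depth range [lo, hi).
def pvOk (rack_mesh : List (List (List Int))) (r c sku : Int) (lo hi : Nat) : Bool :=
  if hi - lo = 0 then true
  else if hi - lo = 1 then
    let v := PySem.List.pyGetD (PySem.List.pyGetD (PySem.List.pyGetD rack_mesh (lo : Int) []) r []) c 0
    v == sku || v == 0
  else
    let mid := (lo + hi) / 2
    pvOk rack_mesh r c sku lo mid && pvOk rack_mesh r c sku mid hi
termination_by hi - lo
decreasing_by all_goals omega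

def check_depth_levels_alt (rack_mesh : List (List (List Int))) (location : Int × Int × Int) : Bool :=
  let d := location.1
  let r := location.2.1
  let c := location.2.2
  let sku_at_loc : Int :=
    PySem.List.pyGetD (PySem.List.pyGetD (PySem.List.pyGetD rack_mesh d []) r []) c 0
  pvOk rack_mesh r c sku_at_loc 0 rack_mesh.length

-- ===== PRECONDITION & SPEC =====
-- Pre_ excludes exactly the inputs where Python A raises an IndexError: the depth index d must
-- be in range of rack_mesh, and (r, c) must be in range of every depth level (the loop visits all).
def Pre_check_depth_levels (rack_mesh : List (List (List Int))) (location : Int × Int × Int) : Prop :=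
  PySem.Raise.InRange rack_mesh.length location.1 ∧
  ∀ level ∈ rack_mesh,
    PySem.Raise.InRange level.length location.2.1 ∧
    PySem.Raise.InRange (PySem.List.pyGetD level location.2.1 []).length location.2.2
instance (rack_mesh : List (List (List Int))) (location : Int × Int × Int) : Decidable (Pre_check_depth_levels rack_mesh location) := by unfold Pre_check_depth_levels; infer_instance

def pvWitness_check_depth_levels : List (List (List Int)) × (Int × Int × Int) :=
  ([[[5, 0], [1, 2]], [[5, 3], [4, 5]]], (0, 0, 0))

def Spec_check_depth_levels (rack_mesh : List (List (List Int))) (location : Int × Int × Int) (out : Bool) : Prop := out = check_depth_levels_alt rack_mesh location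
instance (rack_mesh : List (List (List Int))) (location : Int × Int × Int) (out : Bool) : Decidable (Spec_check_depth_levels rack_mesh location out) := by unfold Spec_check_depth_levels; infer_instance

-- ===== CLAIM (what is proved, stated in full; the proofs are below) =====
def Claim_equal_check_depth_levels : Prop := ∀ (rack_mesh : List (List (List Int))) (location : Int × Int × Int), Dom_check_depth_levels rack_mesh location → Pre_check_depth_levels rack_mesh location → Spec_check_depth_levels rack_mesh location (check_depth_levels rack_mesh location)

-- ===== LEMMAS AND PROOFS =====

-- The per-depth predicate both programs test.
def pvP (rack_mesh : List (List (List Int))) (r c sku : Int) (i : Int) : Bool :=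
  let v := PySem.List.pyGetD (PySem.List.pyGetD (PySem.List.pyGetD rack_mesh i []) r []) c 0
  v == sku || v == 0

-- A's loop reduces to an 'all' over the list.
theorem portA_eq_all (rack_mesh : List (List (List Int))) (r c sku : Int) :
    (if PySem.List.count
        ((PySem.List.pyRange 0 rack_mesh.length 1).foldl
          (fun acc depth_idx =>
            let v := PySem.List.pyGetD (PySem.List.pyGetD (PySem.List.pyGetD rack_mesh depth_idx []) r []) c 0
            if v == sku || v == 0 then acc ++ ["True"] else acc ++ ["False"]) [])
        "False" > 0 then false else true)
    = rack_mesh.all (fun level =>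
        let v := PySem.List.pyGetD (PySem.List.pyGetD level r []) c 0
        v == sku || v == 0) := by
  rw [PySem.List.foldl_pyRange_zero_pyGetD' rack_mesh []
      (fun acc level =>
        let v := PySem.List.pyGetD (PySem.List.pyGetD level r []) c 0
        if v == sku || v == 0 then acc ++ ["True"] else acc ++ ["False"]) []]
  induction rack_mesh using List.reverseRecOn with
  | nil => simp [PySem.List.count]
  | append_singleton xs x ih =>
      simp only [List.foldl_append, List.foldl_cons, List.foldl_nil, List.all_append,
        List.all_cons, List.all_nil]
      by_cases h : (PySem.List.pyGetD (PySem.List.pyGetD x r []) c 0 == sku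
          || PySem.List.pyGetD (PySem.List.pyGetD x r []) c 0 == 0) = true
      · simp only [h, if_pos, ← ih]
        simp [PySem.List.count, List.count_append]
      · simp only [Bool.not_eq_true] at h
        simp [h, PySem.List.count, List.count_append]

-- B's divide-and-conquer on [lo, hi) equals 'all' of the predicate over the index range.
theorem pvOk_eq_range' (rack_mesh : List (List (List Int))) (r c sku : Int) :
    ∀ n lo hi, hi - lo = n →
      pvOk rack_mesh r c sku lo hi
        = (List.range' lo (hi - lo)).all (fun i => pvP rack_mesh r c sku (i : Int)) := by
  intro n
  induction n using Nat.strong_induction_on with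
  | _ n ih =>
    intro lo hi hn
    unfold pvOk
    by_cases h0 : hi - lo = 0
    · simp [h0]
    · by_cases h1 : hi - lo = 1
      · simp [h1, pvP]
      · have hlo : lo < (lo + hi) / 2 := by omega
        have hhi : (lo + hi) / 2 < hi := by omega
        rw [if_neg h0, if_neg h1]
        set mid := (lo + hi) / 2 with hmid
        show (pvOk rack_mesh r c sku lo mid
            && pvOk rack_mesh r c sku mid hi) = _
        rw [ih (mid - lo) (by omega) lo mid rfl,
            ih (hi - mid) (by omega) mid hi rfl]
        have hsplit : List.range' lo (hi - lo)
            = List.range' lo (mid - lo) ++ List.range' mid (hi - mid) := by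
          have hsum : hi - lo = (mid - lo) + (hi - mid) := by omega
          have hstart : mid = lo + (mid - lo) := by omega
          have h2 : lo + (lo + (mid - lo) - lo) = lo + (mid - lo) := by omega
          rw [hsum, hstart, ← List.range'_append_1, h2]
        rw [hsplit, List.all_append]

-- 'all' over the index range equals 'all' over the list itself.
theorem all_range_eq_all (rack_mesh : List (List (List Int))) (r c sku : Int) :
    (List.range' 0 rack_mesh.length).all (fun i => pvP rack_mesh r c sku (i : Int))
      = rack_mesh.all (fun level =>
          let v := PySem.List.pyGetD (PySem.List.pyGetD level r []) c 0
          v == sku || v == 0) := by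
  rw [Bool.eq_iff_iff]
  simp only [List.all_eq_true, ← List.range_eq_range', List.mem_range, pvP,
    PySem.List.pyGetD_natCast]
  constructor
  · intro h level hlev
    obtain ⟨i, hi, rfl⟩ := List.mem_iff_getElem.mp hlev
    have := h i hi
    rwa [List.getD_eq_getElem rack_mesh [] hi] at this
  · intro h i hi
    rw [List.getD_eq_getElem rack_mesh [] hi]
    exact h _ (List.getElem_mem hi)

-- ===== VERDICT (by name: the statement is the Claim_ definition above) =====
theorem check_depth_levels_spec : Claim_equal_check_depth_levels := by
  intro rack_mesh location _ _
  unfold Spec_check_depth_levels check_depth_levels check_depth_levels_alt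
  rw [portA_eq_all,
      pvOk_eq_range' rack_mesh location.2.1 location.2.2 _ (rack_mesh.length - 0) 0 rack_mesh.length rfl,
      Nat.sub_zero]
  exact (all_range_eq_all rack_mesh location.2.1 location.2.2 _).symm
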